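-- pv_equiv track=rewrite | github.com/dpzmick/aoc | python/day11_idiomatic.py | make_node_table
-- ===== SOURCE A (Python) =====
-- def parse_line(line: str) -> tuple[str, list[str]]:
--     """Parse line into source and destinations."""
--     parts = line.split(':')
--     src = parts[0]
--     dsts = parts[1].strip().split()
--     return src, dsts
--
-- def make_node_table(input_str: str) -> dict[str, int]:
--     """Create mapping from node names to IDs."""
--     nodes = set()
--     for line in input_str.strip().split('\n'):
--         if not line:
--             continue
--         src, dsts = parse_line(line)
--         nodes.add(src)
--         nodes.update(dsts)
--
--     return {name: i for i, name in enumerate(sorted(nodes))}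
-- ===== SOURCE B (Python) =====
-- def make_node_table(input_str):
--     """Create mapping from node names to IDs."""
--     # Maintain `names` as an always-sorted list of distinct names; every token is
--     # inserted at its ordered position as it is parsed (no set, no sort call).
--     names = []
--     for line in input_str.strip().split('\n'):
--         if not line:
--             continue
--         parts = line.split(':')
--         for tok in [parts[0]] + parts[1].strip().split():
--             i = 0
--             while i < len(names) and names[i] < tok:
--                 i += 1
--             if i == len(names) or names[i] != tok:
--                 names.insert(i, tok)
--     table = {}
--     for i, name in enumerate(names):
--         table[name] = i
--     return table
-- ===== Notes on version B (the rewrite author's own statement) =====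
-- stated objective: alternative
-- what changed: Replaces the hash-set dedup followed by a batch sorted(set) with an incremental ordered structure: each parsed token is inserted at its ordered position into an always-sorted duplicate-free list (no set, no sort call), and ids are then assigned by an explicit counter loop.
import Mathlib
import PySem

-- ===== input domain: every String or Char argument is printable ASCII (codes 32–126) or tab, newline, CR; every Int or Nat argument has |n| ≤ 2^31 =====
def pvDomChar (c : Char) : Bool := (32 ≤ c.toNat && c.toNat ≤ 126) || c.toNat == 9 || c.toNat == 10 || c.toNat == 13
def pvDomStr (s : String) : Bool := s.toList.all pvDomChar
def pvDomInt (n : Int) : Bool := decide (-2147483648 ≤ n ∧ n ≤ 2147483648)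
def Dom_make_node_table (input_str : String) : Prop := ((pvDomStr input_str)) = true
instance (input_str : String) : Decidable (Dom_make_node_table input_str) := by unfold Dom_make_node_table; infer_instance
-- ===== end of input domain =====

-- B replaces A's hash-set dedup + batch sorted(set) by inserting every parsed token at its ordered
-- position into an always-sorted duplicate-free list, then numbering it with a counter loop ('alternative').

-- ===== PORT A =====
def pvParseLine (line : String) : String × List String :=
  let parts := (PySem.Str.split? line ":").getD []
  let src := PySem.List.pyGetD parts 0 ""
  let dsts := PySem.Str.split₀ (PySem.Str.strip (PySem.List.pyGetD parts 1 ""))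
  (src, dsts)

-- the dict comprehension '{name: i for i, name in enumerate(sorted(nodes))}', returned as items
def pvEnumTable (l : List String) : List (String × Int) :=
  ((PySem.List.enumerate l 0).foldl
    (fun (d : PySem.Dict String Int) (p : Int × String) => d.insert p.2 p.1)
    PySem.Dict.empty).items

def make_node_table (input_str : String) : List (String × Int) :=
  let lines := (PySem.Str.split? (PySem.Str.strip input_str) "\n").getD []
  let nodes : PySem.Set String := lines.foldl
    (fun s line =>
      if line == "" then s
      else
        let p := pvParseLine line
        PySem.Set.update (PySem.Set.add s p.1) p.2)
    PySem.Set.empty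
  pvEnumTable (PySem.List.sorted nodes (fun x => x) false)

-- ===== PORT B =====
-- B's inner 'while i < len(names) and names[i] < tok … insert if absent' loop,
-- as the obvious structural recursion over the sorted list
def pvInsOrd (tok : String) : List String → List String
  | [] => [tok]
  | a :: t =>
      if a < tok then a :: pvInsOrd tok t
      else if a == tok then a :: t
      else tok :: a :: t

def make_node_table_alt (input_str : String) : List (String × Int) :=
  let names : List String := ((PySem.Str.split? (PySem.Str.strip input_str) "\n").getD []).foldl
    (fun names line =>
      if line == "" then names
      else
        let parts := (PySem.Str.split? line ":").getD []
        ((PySem.List.pyGetD parts 0 "")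
            :: PySem.Str.split₀ (PySem.Str.strip (PySem.List.pyGetD parts 1 ""))).foldl
          (fun ns tok => pvInsOrd tok ns) names)
    []
  -- explicit 'table = {}; for i, name in enumerate(names): table[name] = i'
  ((PySem.List.enumerate names 0).foldl
    (fun (d : PySem.Dict String Int) (p : Int × String) => d.insert p.2 p.1)
    PySem.Dict.empty).items

-- ===== PRECONDITION & SPEC =====
-- Pre_ excludes exactly the inputs on which Python A raises IndexError: a nonempty line of the
-- stripped input that contains no colon separator makes parts[1] fail (B's Python raises there too).
def Pre_make_node_table (input_str : String) : Prop :=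
  ∀ line ∈ (PySem.Str.split? (PySem.Str.strip input_str) "\n").getD [],
    line ≠ "" → PySem.Str.isIn ":" line = true
instance (input_str : String) : Decidable (Pre_make_node_table input_str) := by
  unfold Pre_make_node_table; infer_instance
def pvWitness_make_node_table : String := "a: b c\nb: c"

def Spec_make_node_table (input_str : String) (out : List (String × Int)) : Prop :=
  out = make_node_table_alt input_str
instance (input_str : String) (out : List (String × Int)) : Decidable (Spec_make_node_table input_str out) := by
  unfold Spec_make_node_table; infer_instance

-- ===== CLAIM =====
def Claim_equal_make_node_table : Prop :=
  ∀ (input_str : String), Dom_make_node_table input_str → Pre_make_node_table input_str →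
    Spec_make_node_table input_str (make_node_table input_str)

-- ===== LEMMAS AND PROOFS =====

-- per-line token contribution (proof-side view common to both ports)
def pvGLine (line : String) : List String :=
  if line == "" then []
  else
    let parts := (PySem.Str.split? line ":").getD []
    PySem.List.pyGetD parts 0 ""
      :: PySem.Str.split₀ (PySem.Str.strip (PySem.List.pyGetD parts 1 ""))

theorem pvA_fold_eq (lines : List String) (s : PySem.Set String) :
    lines.foldl
      (fun s line =>
        if line == "" then s
        else
          let p := pvParseLine line
          PySem.Set.update (PySem.Set.add s p.1) p.2) s
    = PySem.Set.update s (lines.flatMap pvGLine) := by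
  induction lines generalizing s with
  | nil => simp [PySem.Set.update]
  | cons a t ih =>
      simp only [List.foldl_cons, List.flatMap_cons, ih]
      have h : (if a == "" then s
          else
            let p := pvParseLine a
            PySem.Set.update (PySem.Set.add s p.1) p.2)
          = PySem.Set.update s (pvGLine a) := by
        by_cases ha : a = ""
        · simp [ha, pvGLine, PySem.Set.update]
        · simp [ha, pvGLine, pvParseLine, PySem.Set.update, PySem.Set.add, List.foldl_cons]
      rw [h, PySem.Set.update, PySem.Set.update, PySem.Set.update, List.foldl_append]

theorem pvB_fold_eq (lines : List String) (acc : List String) :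
    lines.foldl
      (fun names line =>
        if line == "" then names
        else
          let parts := (PySem.Str.split? line ":").getD []
          ((PySem.List.pyGetD parts 0 "")
              :: PySem.Str.split₀ (PySem.Str.strip (PySem.List.pyGetD parts 1 ""))).foldl
            (fun ns tok => pvInsOrd tok ns) names) acc
    = (lines.flatMap pvGLine).foldl (fun ns tok => pvInsOrd tok ns) acc := by
  induction lines generalizing acc with
  | nil => rw [List.foldl_nil, List.flatMap_nil, List.foldl_nil]
  | cons a t ih =>
      rw [List.foldl_cons, List.flatMap_cons, List.foldl_append, ih]
      congr 1
      by_cases ha : a = ""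
      · rw [if_pos (by simp [ha])]; unfold pvGLine; rw [if_pos (by simp [ha])]
        rw [List.foldl_nil]
      · rw [if_neg (by simp [ha])]; unfold pvGLine; rw [if_neg (by simp [ha])]

theorem pvInsOrd_mem (tok y : String) : ∀ (l : List String),
    (y ∈ pvInsOrd tok l ↔ y = tok ∨ y ∈ l) := by
  intro l
  induction l with
  | nil => simp [pvInsOrd]
  | cons a t ih =>
      unfold pvInsOrd
      split_ifs with h1 h2
      · simp only [List.mem_cons, ih]; tauto
      · have : a = tok := by simpa using h2
        subst this; simp only [List.mem_cons]; tauto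
      · simp only [List.mem_cons]

theorem pvInsOrd_pairwise (tok : String) : ∀ (l : List String),
    l.Pairwise (· < ·) → (pvInsOrd tok l).Pairwise (· < ·) := by
  intro l
  induction l with
  | nil => simp [pvInsOrd]
  | cons a t ih =>
      intro hpw
      unfold pvInsOrd
      split_ifs with h1 h2
      · refine List.Pairwise.cons ?_ (ih hpw.of_cons)
        intro y hy
        rcases (pvInsOrd_mem tok y t).1 hy with h | h
        · exact h ▸ h1
        · exact List.rel_of_pairwise_cons hpw h
      · exact hpw
      · have hne : a ≠ tok := fun he => h2 (he ▸ beq_self_eq_true a)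
        have hlt : tok < a := lt_of_le_of_ne (le_of_not_gt h1) (Ne.symm hne)
        refine List.Pairwise.cons ?_ hpw
        intro y hy
        rcases List.mem_cons.1 hy with h | h
        · exact h ▸ hlt
        · exact lt_trans hlt (List.rel_of_pairwise_cons hpw h)

-- B's whole insertion fold, sorted&distinct with membership = seen tokens
theorem pvInsFold (toks : List String) (acc : List String) (hpw : acc.Pairwise (· < ·)) :
    (toks.foldl (fun ns tok => pvInsOrd tok ns) acc).Pairwise (· < ·)
    ∧ ∀ y, y ∈ toks.foldl (fun ns tok => pvInsOrd tok ns) acc ↔ (y ∈ toks ∨ y ∈ acc) := by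
  induction toks generalizing acc with
  | nil => simpa using hpw
  | cons a t ih =>
      obtain ⟨h1, h2⟩ := ih (pvInsOrd a acc) (pvInsOrd_pairwise a acc hpw)
      refine ⟨h1, fun y => ?_⟩
      rw [List.foldl_cons] at *
      rw [h2 y, pvInsOrd_mem]
      simp; tauto

theorem pvMain (toks : List String) :
    PySem.List.sorted (PySem.Set.ofList toks) (fun x => x) false
    = toks.foldl (fun ns tok => pvInsOrd tok ns) [] := by
  obtain ⟨h1, h2⟩ := pvInsFold toks [] (by simp)
  apply PySem.List.sorted_eq_of_perm_of_pairwise_lt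
  · have hnd1 : (toks.foldl (fun ns tok => pvInsOrd tok ns) []).Nodup :=
      h1.imp (fun h => ne_of_lt h)
    refine (List.perm_ext_iff_of_nodup hnd1 (PySem.Set.nodup_ofList toks)).2 ?_
    intro x
    rw [h2 x, PySem.Set.mem_ofList]
    simp
  · simpa using h1

-- ===== VERDICT =====
theorem make_node_table_spec : Claim_equal_make_node_table := by
  intro input_str _ _
  unfold Spec_make_node_table make_node_table make_node_table_alt pvEnumTable
  simp only [pvA_fold_eq, pvB_fold_eq]
  have h : PySem.Set.update PySem.Set.empty
      ((((PySem.Str.split? (PySem.Str.strip input_str) "\n").getD [])).flatMap pvGLine)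
      = PySem.Set.ofList ((((PySem.Str.split? (PySem.Str.strip input_str) "\n").getD [])).flatMap pvGLine) := rfl
  rw [h, pvMain]
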